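-- pv_equiv track=rewrite | github.com/htang7415/Max-Handbook | modules/ai-agents/memory/memory-retention-policy/python/memory_retention_policy.py | score_memory_items
-- ===== SOURCE A (Python) =====
-- def score_memory_items(items: list[str], keyword_weights: dict[str, int]) -> list[tuple[str, int]]:
--     scored: list[tuple[str, int]] = []
--     for item in items:
--         cleaned = item.strip()
--         if not cleaned:
--             continue
--         lowered = cleaned.lower()
--         score = sum(weight for keyword, weight in keyword_weights.items() if keyword.strip().lower() in lowered)
--         scored.append((cleaned, score))
--     return scored
-- ===== SOURCE B (Python) =====
-- def score_memory_items(items: list[str], keyword_weights: dict[str, int]) -> list[tuple[str, int]]: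
--     # keyword-major traversal: normalize each keyword once, then sweep it across all items
--     cleaned = [c for c in (item.strip() for item in items) if c]
--     lowered = [c.lower() for c in cleaned]
--     scores = [0] * len(cleaned)
--     for keyword, weight in keyword_weights.items():
--         needle = keyword.strip().lower()
--         scores = [s + weight if needle in text else s for text, s in zip(lowered, scores)]
--     return list(zip(cleaned, scores))
-- ===== Notes on version B (the rewrite author's own statement) =====
-- stated objective: alternative
-- what changed: B inverts the loop nesting: it pre-cleans and pre-lowers all items once, normalizes each keyword exactly once, and sweeps each normalized keyword across the score list (keyword-major), instead of A's item-major loop that re-strips and re-lowers every keyword for every item.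
import Mathlib
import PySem

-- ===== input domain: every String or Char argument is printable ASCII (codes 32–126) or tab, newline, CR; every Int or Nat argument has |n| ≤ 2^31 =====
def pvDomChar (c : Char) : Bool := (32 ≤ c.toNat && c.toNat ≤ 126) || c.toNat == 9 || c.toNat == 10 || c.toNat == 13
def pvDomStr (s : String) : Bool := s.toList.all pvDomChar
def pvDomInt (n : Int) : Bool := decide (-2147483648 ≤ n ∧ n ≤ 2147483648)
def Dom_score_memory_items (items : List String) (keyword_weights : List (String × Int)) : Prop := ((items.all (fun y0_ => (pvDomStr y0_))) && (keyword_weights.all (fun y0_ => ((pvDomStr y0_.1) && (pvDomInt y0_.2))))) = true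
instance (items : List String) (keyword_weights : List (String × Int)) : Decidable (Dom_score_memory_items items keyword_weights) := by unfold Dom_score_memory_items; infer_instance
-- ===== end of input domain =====

-- B replaces A's item-major loop (which re-normalizes every keyword for every item) by a
-- keyword-major sweep over pre-cleaned items with each keyword normalized once (objective: alternative).

-- ===== PORT A =====
def score_memory_items (items : List String) (keyword_weights : List (String × Int)) : List (String × Int) :=
  items.foldl (fun scored item =>
    let cleaned := PySem.Str.strip item
    if cleaned = "" then scored
    else
      let lowered := PySem.Str.lower cleaned
      let score := keyword_weights.foldl
        (fun s p => if PySem.Str.isIn (PySem.Str.lower (PySem.Str.strip p.1)) lowered then s + p.2 else s) 0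
      scored ++ [(cleaned, score)]) []

-- ===== PORT B =====
def score_memory_items_alt (items : List String) (keyword_weights : List (String × Int)) : List (String × Int) :=
  let cleaned := (items.map PySem.Str.strip).filter (fun c => c ≠ "")
  let lowered := cleaned.map PySem.Str.lower
  let scores := keyword_weights.foldl
    (fun scores p =>
      let needle := PySem.Str.lower (PySem.Str.strip p.1)
      (lowered.zip scores).map (fun q => if PySem.Str.isIn needle q.1 then q.2 + p.2 else q.2))
    (List.replicate cleaned.length (0 : Int))
  cleaned.zip scores

-- ===== PRECONDITION & SPEC =====
def Spec_score_memory_items (items : List String) (keyword_weights : List (String × Int)) (out : List (String × Int)) : Prop := out = score_memory_items_alt items keyword_weights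
instance (items : List String) (keyword_weights : List (String × Int)) (out : List (String × Int)) : Decidable (Spec_score_memory_items items keyword_weights out) := by unfold Spec_score_memory_items; infer_instance

-- ===== CLAIM (what is proved, stated in full; the proofs are below) =====
def Claim_equal_score_memory_items : Prop := ∀ (items : List String) (keyword_weights : List (String × Int)), Dom_score_memory_items items keyword_weights → Spec_score_memory_items items keyword_weights (score_memory_items items keyword_weights)

-- ===== LEMMAS AND PROOFS =====

-- the per-item score both programs compute for a lowered item
def pvScoreOf (kw : List (String × Int)) (t : String) : Int :=
  kw.foldl (fun s p => if PySem.Str.isIn (PySem.Str.lower (PySem.Str.strip p.1)) t then s + p.2 else s) 0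

lemma pv_zip_self_map {α β : Type} (l : List α) (g : α → β) :
    l.zip (l.map g) = l.map (fun t => (t, g t)) := by
  induction l with
  | nil => rfl
  | cons a l ih => simp [ih]

-- A's loop, characterized
lemma pvA_char (kw : List (String × Int)) (items : List String) (acc : List (String × Int)) :
    items.foldl (fun scored item =>
      let cleaned := PySem.Str.strip item
      if cleaned = "" then scored
      else
        let lowered := PySem.Str.lower cleaned
        let score := kw.foldl
          (fun s p => if PySem.Str.isIn (PySem.Str.lower (PySem.Str.strip p.1)) lowered then s + p.2 else s) 0
        scored ++ [(cleaned, score)]) acc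
    = acc ++ ((items.map PySem.Str.strip).filter (fun c => c ≠ "")).map
        (fun c => (c, pvScoreOf kw (PySem.Str.lower c))) := by
  induction items generalizing acc with
  | nil => simp
  | cons a as ih =>
    simp only [List.foldl_cons]
    rw [ih]
    by_cases h : PySem.Str.strip a = ""
    · simp [h]
    · simp [h, pvScoreOf]

-- B's keyword-major fold, characterized: it maps each lowered item to its score
lemma pvB_fold (kw : List (String × Int)) (lowered : List String) (g : String → Int) :
    kw.foldl (fun scores p =>
        (lowered.zip scores).map
          (fun q => if PySem.Str.isIn (PySem.Str.lower (PySem.Str.strip p.1)) q.1 then q.2 + p.2 else q.2))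
      (lowered.map g)
    = lowered.map (fun t =>
        kw.foldl (fun s p => if PySem.Str.isIn (PySem.Str.lower (PySem.Str.strip p.1)) t then s + p.2 else s) (g t)) := by
  induction kw generalizing g with
  | nil => rfl
  | cons p kw ih =>
    simp only [List.foldl_cons]
    rw [pv_zip_self_map, List.map_map]
    have := ih (fun t => if PySem.Str.isIn (PySem.Str.lower (PySem.Str.strip p.1)) t then g t + p.2 else g t)
    simpa using this

-- B's result, characterized
lemma pvB_char (items : List String) (kw : List (String × Int)) :
    score_memory_items_alt items kw
      = ((items.map PySem.Str.strip).filter (fun c => c ≠ "")).map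
          (fun c => (c, pvScoreOf kw (PySem.Str.lower c))) := by
  show (((items.map PySem.Str.strip).filter (fun c => c ≠ "")).zip
      (kw.foldl (fun scores p =>
        ((((items.map PySem.Str.strip).filter (fun c => c ≠ "")).map PySem.Str.lower).zip scores).map
          (fun q => if PySem.Str.isIn (PySem.Str.lower (PySem.Str.strip p.1)) q.1 then q.2 + p.2 else q.2))
        (List.replicate ((items.map PySem.Str.strip).filter (fun c => c ≠ "")).length (0 : Int)))) = _
  have hrep : List.replicate ((items.map PySem.Str.strip).filter (fun c => c ≠ "")).length (0 : Int)
      = (((items.map PySem.Str.strip).filter (fun c => c ≠ "")).map PySem.Str.lower).map (fun _ => (0 : Int)) := by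
    rw [List.map_const', List.length_map]
  rw [hrep, pvB_fold, List.map_map, pv_zip_self_map]
  simp [pvScoreOf, Function.comp]

-- ===== VERDICT (by name: the statement is the Claim_ definition above) =====
theorem score_memory_items_spec : Claim_equal_score_memory_items := by
  intro items kw _
  unfold Spec_score_memory_items score_memory_items
  rw [pvA_char, pvB_char]
  simp
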